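-- pv_equiv track=rewrite | github.com/Julesc013/dominium | tools/domain/tool_domain_validate.py | _id_duplicates
-- ===== SOURCE A (Python) =====
-- from typing import Dict, List, Tuple
--
-- def _err(code: str, message: str, path: str) -> dict:
--     return {
--         "code": str(code),
--         "message": str(message),
--         "path": str(path),
--     }
--
-- def _id_duplicates(rows: List[dict], field: str, code: str, path_prefix: str) -> List[dict]:
--     seen: Dict[str, int] = {}
--     dup: List[dict] = []
--     for idx, row in enumerate(rows):
--         token = str((row or {}).get(field, "")).strip()
--         if not token:
--             continue
--         if token in seen:
--             dup.append(
--                 _err(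
--                     code,
--                     "duplicate id '{}' at records[{}] and records[{}]".format(token, seen[token], idx),
--                     "{}.records[{}].{}".format(path_prefix, idx, field),
--                 )
--             )
--         else:
--             seen[token] = idx
--     return dup
-- ===== SOURCE B (Python) =====
-- def _err(code: str, message: str, path: str) -> dict:
--     return {
--         "code": str(code),
--         "message": str(message),
--         "path": str(path),
--     }
--
-- def _id_duplicates(rows, field, code, path_prefix):
--     # Pass 1: record the first index of each non-empty token.
--     first = {}
--     for idx, row in enumerate(rows):
--         token = str((row or {}).get(field, "")).strip()
--         if token and token not in first:
--             first[token] = idx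
--     # Pass 2: every non-first occurrence is a duplicate, paired with the first one.
--     out = []
--     for idx, row in enumerate(rows):
--         token = str((row or {}).get(field, "")).strip()
--         if token and first[token] != idx:
--             out.append(_err(
--                 code,
--                 "duplicate id '{}' at records[{}] and records[{}]".format(token, first[token], idx),
--                 "{}.records[{}].{}".format(path_prefix, idx, field),
--             ))
--     return out
-- ===== Notes on version B (the rewrite author's own statement) =====
-- stated objective: alternative
-- what changed: Replaces the single stateful scan (dict of seen indices threaded with the error accumulator) by two stateless passes: pass one builds the first-occurrence index map, pass two emits an error for every non-first occurrence; the pairing/order is proved identical.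
import Mathlib
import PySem

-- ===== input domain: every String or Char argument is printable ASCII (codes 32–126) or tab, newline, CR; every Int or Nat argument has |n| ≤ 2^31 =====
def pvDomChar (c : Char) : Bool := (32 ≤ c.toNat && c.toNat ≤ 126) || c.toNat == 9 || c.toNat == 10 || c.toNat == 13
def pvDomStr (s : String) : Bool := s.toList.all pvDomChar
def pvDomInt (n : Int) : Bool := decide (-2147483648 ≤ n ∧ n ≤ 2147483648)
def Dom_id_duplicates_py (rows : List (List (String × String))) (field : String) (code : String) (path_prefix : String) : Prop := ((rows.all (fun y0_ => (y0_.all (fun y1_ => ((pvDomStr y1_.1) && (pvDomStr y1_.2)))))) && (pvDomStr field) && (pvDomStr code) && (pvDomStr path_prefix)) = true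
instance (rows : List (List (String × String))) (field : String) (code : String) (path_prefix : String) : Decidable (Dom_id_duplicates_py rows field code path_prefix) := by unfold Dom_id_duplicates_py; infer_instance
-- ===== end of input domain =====

-- B replaces A's single stateful scan by two stateless passes (first-occurrence map, then emission); same return value, objective: alternative decomposition.

-- shared helpers (identical expressions in both Pythons): token extraction and error construction
-- token = str((row or {}).get(field, "")).strip()  ('row or {}' only swaps an empty dict for an empty dict; .get = first-match lookup)
def pvTok (field : String) (row : List (String × String)) : String :=
  PySem.Str.strip ((PySem.Dict.mk row).getD field "")

def pvErr (code message path : String) : List (String × String) :=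
  [("code", code), ("message", message), ("path", path)]

def pvMsg (t : String) (j i : Nat) : String :=
  "duplicate id '" ++ t ++ "' at records[" ++ PySem.Int.toStr (Int.ofNat j) ++ "] and records[" ++ PySem.Int.toStr (Int.ofNat i) ++ "]"

def pvPath (path_prefix : String) (i : Nat) (field : String) : String :=
  path_prefix ++ ".records[" ++ PySem.Int.toStr (Int.ofNat i) ++ "]." ++ field

-- ===== PORT A =====
-- A's loop: seen (first index of each token so far) and dup (accumulated errors) threaded together
def pvGoA (field code path_prefix : String) : List (List (String × String)) → Nat → PySem.Dict String Nat → List (List (String × String)) → List (List (String × String))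
  | [], _, _, dup => dup
  | row :: rest, idx, seen, dup =>
    let t := pvTok field row
    if t = "" then pvGoA field code path_prefix rest (idx + 1) seen dup
    else match seen.get? t with
      | some j => pvGoA field code path_prefix rest (idx + 1) seen (dup ++ [pvErr code (pvMsg t j idx) (pvPath path_prefix idx field)])
      | none => pvGoA field code path_prefix rest (idx + 1) (seen.insert t idx) dup

def id_duplicates_py (rows : List (List (String × String))) (field : String) (code : String) (path_prefix : String) : List (List (String × String)) :=
  pvGoA field code path_prefix rows 0 PySem.Dict.empty []

-- ===== PORT B =====
-- pass 1: first[token] = idx for the first non-empty occurrence of each token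
def pvFirstB (field : String) : List (List (String × String)) → Nat → PySem.Dict String Nat → PySem.Dict String Nat
  | [], _, first => first
  | row :: rest, idx, first =>
    let t := pvTok field row
    pvFirstB field rest (idx + 1) (if t = "" then first else if first.contains t then first else first.insert t idx)

-- pass 2: emit an error for every non-empty token whose first occurrence is elsewhere
-- (the 'none' branch is unreachable — pass 1 recorded every non-empty token — it only totalizes the lookup)
def pvEmitB (field code path_prefix : String) (first : PySem.Dict String Nat) : List (List (String × String)) → Nat → List (List (String × String))
  | [], _ => []
  | row :: rest, idx =>
    let t := pvTok field row
    (if t = "" then []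
     else match first.get? t with
       | some j => if j ≠ idx then [pvErr code (pvMsg t j idx) (pvPath path_prefix idx field)] else []
       | none => []) ++ pvEmitB field code path_prefix first rest (idx + 1)

def id_duplicates_py_alt (rows : List (List (String × String))) (field : String) (code : String) (path_prefix : String) : List (List (String × String)) :=
  pvEmitB field code path_prefix (pvFirstB field rows 0 PySem.Dict.empty) rows 0

-- ===== PRECONDITION & SPEC =====
def Spec_id_duplicates_py (rows : List (List (String × String))) (field : String) (code : String) (path_prefix : String) (out : List (List (String × String))) : Prop := out = id_duplicates_py_alt rows field code path_prefix
instance (rows : List (List (String × String))) (field : String) (code : String) (path_prefix : String) (out : List (List (String × String))) : Decidable (Spec_id_duplicates_py rows field code path_prefix out) := by unfold Spec_id_duplicates_py; infer_instance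

-- ===== CLAIM (what is proved, stated in full; the proofs are below) =====
def Claim_equal_id_duplicates_py : Prop := ∀ (rows : List (List (String × String))) (field : String) (code : String) (path_prefix : String), Dom_id_duplicates_py rows field code path_prefix → Spec_id_duplicates_py rows field code path_prefix (id_duplicates_py rows field code path_prefix)

-- ===== LEMMAS AND PROOFS =====

-- pass 1 never overwrites: a key already bound keeps its value
lemma pvFirstB_get?_of_some (field t : String) (j : Nat) :
    ∀ (rows : List (List (String × String))) (idx : Nat) (first : PySem.Dict String Nat),
      first.get? t = some j → (pvFirstB field rows idx first).get? t = some j := by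
  intro rows
  induction rows with
  | nil => intro idx first h; simpa [pvFirstB] using h
  | cons row rest ih =>
    intro idx first h
    simp only [pvFirstB]
    apply ih
    split_ifs with h1 h2
    · exact h
    · exact h
    · have hne : pvTok field row ≠ t := by
        intro he
        rw [he, PySem.Dict.contains_eq_isSome_get?, h] at h2
        simp at h2
      rw [PySem.Dict.get?_insert, if_neg (fun he => hne he.symm)]
      exact h

-- main invariant: A's loop from state (seen, dup) equals dup ++ pass-2 emission over pass-1's completed map,
-- provided every index recorded in seen is below the current index
lemma pvGoA_eq_emit (field code path_prefix : String) :
    ∀ (rows : List (List (String × String))) (idx : Nat) (seen : PySem.Dict String Nat) (dup : List (List (String × String))),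
      (∀ t j, seen.get? t = some j → j < idx) →
      pvGoA field code path_prefix rows idx seen dup
        = dup ++ pvEmitB field code path_prefix (pvFirstB field rows idx seen) rows idx := by
  intro rows
  induction rows with
  | nil => intro idx seen dup _; simp [pvGoA, pvEmitB]
  | cons row rest ih =>
    intro idx seen dup hinv
    simp only [pvGoA, pvEmitB, pvFirstB]
    by_cases ht : pvTok field row = ""
    · simp only [ht]
      exact ih (idx + 1) seen dup (fun t j h => Nat.lt_succ_of_lt (hinv t j h))
    · simp only [if_neg ht]
      cases hg : seen.get? (pvTok field row) with
      | some j =>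
        have hc : seen.contains (pvTok field row) = true := by
          rw [PySem.Dict.contains_eq_isSome_get?, hg]; rfl
        have hfg := pvFirstB_get?_of_some field (pvTok field row) j rest (idx + 1) seen hg
        have hne : j ≠ idx := Nat.ne_of_lt (hinv _ _ hg)
        simp only [hc, if_true]
        rw [ih (idx + 1) seen (dup ++ [pvErr code (pvMsg (pvTok field row) j idx) (pvPath path_prefix idx field)])
              (fun t j' h => Nat.lt_succ_of_lt (hinv t j' h))]
        simp [hfg, hne, List.append_assoc]
      | none =>
        have hc : seen.contains (pvTok field row) = false := by
          rw [PySem.Dict.contains_eq_isSome_get?, hg]; rfl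
        have hins : (seen.insert (pvTok field row) idx).get? (pvTok field row) = some idx :=
          PySem.Dict.get?_insert_self _ _ _
        have hfg := pvFirstB_get?_of_some field (pvTok field row) idx rest (idx + 1) _ hins
        have hinv' : ∀ t j, (seen.insert (pvTok field row) idx).get? t = some j → j < idx + 1 := by
          intro t j h
          rw [PySem.Dict.get?_insert] at h
          by_cases he : t = pvTok field row
          · rw [if_pos he] at h; cases h; omega
          · rw [if_neg he] at h; exact Nat.lt_succ_of_lt (hinv t j h)
        rw [ih (idx + 1) (seen.insert (pvTok field row) idx) dup hinv']
        simp [hc, hfg]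

-- ===== VERDICT (by name: the statement is the Claim_ definition above) =====
theorem id_duplicates_py_spec : Claim_equal_id_duplicates_py := by
  intro rows field code path_prefix _
  unfold Spec_id_duplicates_py id_duplicates_py id_duplicates_py_alt
  have h := pvGoA_eq_emit field code path_prefix rows 0 PySem.Dict.empty []
    (by intro t j h; rw [PySem.Dict.get?_empty] at h; cases h)
  simpa using h
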